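-- pv_equiv track=rewrite | github.com/MrEgyptian/trx-vanity-address | trx_vanity_address.py | _calculate_vanity_score
-- ===== SOURCE A (Python) =====
-- def _calculate_vanity_score(address: str, pattern: str) -> int:
--     """计算靓号分数"""
--     if pattern.startswith('consecutive_'):
--         count = int(pattern.split('_')[1])
--         max_consecutive = 0
--         current_consecutive = 1
--
--         for i in range(1, len(address)):
--             if address[i] == address[i-1]:
--                 current_consecutive += 1
--             else:
--                 max_consecutive = max(max_consecutive, current_consecutive)
--                 current_consecutive = 1
--
--         max_consecutive = max(max_consecutive, current_consecutive)
--         return max_consecutive * 10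
--
--     elif pattern.startswith('repeat_'):
--         digit = pattern.split('_')[1]
--         return address.count(digit) * 5
--
--     else:
--         return len(pattern) * 2
-- ===== SOURCE B (Python) =====
-- def _calculate_vanity_score(address: str, pattern: str) -> int:
--     if pattern.startswith('consecutive_'):
--         n = len(address)
--         cuts = [0] + [i for i in range(1, n) if address[i] != address[i - 1]] + [n]
--         return max([1] + [b - a for a, b in zip(cuts, cuts[1:])]) * 10
--     elif pattern.startswith('repeat_'):
--         return address.count(pattern.split('_')[1]) * 5
--     else:
--         return len(pattern) * 2
-- ===== Notes on version B (the rewrite author's own statement) =====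
-- stated objective: alternative
-- what changed: The consecutive_ branch's running (max_consecutive, current_consecutive) state machine is replaced by computing the list of run-boundary positions (plus 0 and len) and taking the max of their successive differences; the other branches are unchanged.
-- crash fix: On patterns of the form 'consecutive_<x>' where <x> (the text after the first '_') is not a valid int literal, A raises ValueError from the unused int() conversion; B skips the conversion and returns max_run*10. — e.g. on _calculate_vanity_score("aa", "consecutive_x"): A raises ValueError, B returns 20
import Mathlib
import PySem

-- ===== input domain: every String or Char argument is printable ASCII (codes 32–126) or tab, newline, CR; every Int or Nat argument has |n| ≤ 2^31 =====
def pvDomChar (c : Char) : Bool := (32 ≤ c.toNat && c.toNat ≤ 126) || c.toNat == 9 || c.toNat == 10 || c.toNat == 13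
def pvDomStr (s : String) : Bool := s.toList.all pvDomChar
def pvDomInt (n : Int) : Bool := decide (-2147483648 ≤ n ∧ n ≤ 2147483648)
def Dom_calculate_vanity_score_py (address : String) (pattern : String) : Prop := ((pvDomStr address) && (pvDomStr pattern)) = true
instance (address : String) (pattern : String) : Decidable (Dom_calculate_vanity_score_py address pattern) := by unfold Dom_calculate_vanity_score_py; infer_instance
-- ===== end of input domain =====

-- B replaces A's running (max, current) state machine in the consecutive_ branch by
-- computing the run-boundary positions and taking the max of their successive differences
-- (objective: alternative decomposition, same cost).

-- ===== PORT A =====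
def calculate_vanity_score_py (address : String) (pattern : String) : Int :=
  if PySem.Str.startswith pattern "consecutive_" then
    -- count = int(pattern.split('_')[1]) : the value is unused by the Python; a ValueError
    -- (ofStr? = none) is excluded by Pre_, so the `none => 0` branch is never claimed about.
    -- split? "_" is always `some` ("_" ≠ ""), and index 1 exists since pattern contains '_'.
    match PySem.Int.ofStr? ((((PySem.Str.split? pattern "_").getD []).getD 1 "")) with
    | none => 0
    | some _count =>
      let l := address.toList
      let s := (PySem.List.pyRange 1 (l.length : Int) 1).foldl
        (fun (s : Int × Int) i =>
          if PySem.List.pyGet? l i == PySem.List.pyGet? l (i - 1) then (s.1, s.2 + 1)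
          else (max s.1 s.2, 1)) ((0 : Int), (1 : Int))
      (max s.1 s.2) * 10
  else if PySem.Str.startswith pattern "repeat_" then
    ((PySem.Str.count address (((PySem.Str.split? pattern "_").getD []).getD 1 "") : Int)) * 5
  else
    (PySem.Str.len pattern : Int) * 2

-- ===== PORT B =====
def calculate_vanity_score_py_alt (address : String) (pattern : String) : Int :=
  if PySem.Str.startswith pattern "consecutive_" then
    let l := address.toList
    let n : Int := l.length
    let cuts : List Int :=
      0 :: ((PySem.List.pyRange 1 n 1).filter
        (fun i => PySem.List.pyGet? l i != PySem.List.pyGet? l (i - 1)) ++ [n])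
    let diffs := (cuts.zip cuts.tail).map (fun p => p.2 - p.1)
    -- max([1] + diffs)
    (diffs.foldl max 1) * 10
  else if PySem.Str.startswith pattern "repeat_" then
    ((PySem.Str.count address (((PySem.Str.split? pattern "_").getD []).getD 1 "") : Int)) * 5
  else
    (PySem.Str.len pattern : Int) * 2

-- ===== PRECONDITION & SPEC =====
-- Pre_ excludes only inputs where A raises ValueError: pattern 'consecutive_<x>' with <x> not an int literal.
def Pre_calculate_vanity_score_py (address : String) (pattern : String) : Prop :=
  PySem.Str.startswith pattern "consecutive_" = true →
    (PySem.Int.ofStr? ((((PySem.Str.split? pattern "_").getD []).getD 1 ""))).isSome = true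
instance (address : String) (pattern : String) : Decidable (Pre_calculate_vanity_score_py address pattern) := by unfold Pre_calculate_vanity_score_py; infer_instance
def pvWitness_calculate_vanity_score_py : String × String := ("aab", "consecutive_3")

-- On patterns 'consecutive_<x>' whose suffix after the first '_' is not an int literal, A raises ValueError; B returns max-run*10.
def Raises_calculate_vanity_score_py (address : String) (pattern : String) : Prop :=
  PySem.Str.startswith pattern "consecutive_" = true ∧
    PySem.Int.ofStr? ((((PySem.Str.split? pattern "_").getD []).getD 1 "")) = none
instance (address : String) (pattern : String) : Decidable (Raises_calculate_vanity_score_py address pattern) := by unfold Raises_calculate_vanity_score_py; infer_instance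
def pvRaiseWitness_calculate_vanity_score_py : String × String := ("aa", "consecutive_x")
def pvRaiseWitnessOut_calculate_vanity_score_py : Int := 20

def Spec_calculate_vanity_score_py (address : String) (pattern : String) (out : Int) : Prop := out = calculate_vanity_score_py_alt address pattern
instance (address : String) (pattern : String) (out : Int) : Decidable (Spec_calculate_vanity_score_py address pattern out) := by unfold Spec_calculate_vanity_score_py; infer_instance

-- ===== CLAIM (what is proved, stated in full; the proofs are below) =====
def Claim_equal_calculate_vanity_score_py : Prop := ∀ (address : String) (pattern : String), Dom_calculate_vanity_score_py address pattern → Pre_calculate_vanity_score_py address pattern → Spec_calculate_vanity_score_py address pattern (calculate_vanity_score_py address pattern)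
def Claim_raises_calculate_vanity_score_py : Prop := (∀ (address : String) (pattern : String), Dom_calculate_vanity_score_py address pattern → Raises_calculate_vanity_score_py address pattern → ¬ Pre_calculate_vanity_score_py address pattern) ∧ (Dom_calculate_vanity_score_py (pvRaiseWitness_calculate_vanity_score_py.1) (pvRaiseWitness_calculate_vanity_score_py.2) ∧ Raises_calculate_vanity_score_py (pvRaiseWitness_calculate_vanity_score_py.1) (pvRaiseWitness_calculate_vanity_score_py.2) ∧ calculate_vanity_score_py_alt (pvRaiseWitness_calculate_vanity_score_py.1) (pvRaiseWitness_calculate_vanity_score_py.2) = pvRaiseWitnessOut_calculate_vanity_score_py)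

-- ===== LEMMAS AND PROOFS =====

-- successive differences of (prev :: cs ++ [n])
def pvGdiffs (prev : Int) (cs : List Int) (n : Int) : List Int :=
  match cs with
  | [] => [n - prev]
  | c :: cs' => (c - prev) :: pvGdiffs c cs' n

theorem pvZipDiff (cs : List Int) (prev n : Int) :
    (((prev :: (cs ++ [n])).zip (cs ++ [n])).map (fun p => p.2 - p.1)) = pvGdiffs prev cs n := by
  induction cs generalizing prev with
  | nil => simp [pvGdiffs]
  | cons c cs' ih => simp [pvGdiffs, ih c]

theorem pvInvariant (p : Int → Bool) (n : Int) :
    ∀ (k : Nat) (a lastcut mx : Int), a ≤ n → (n - a).toNat = k →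
    (let s := (PySem.List.pyRange a n 1).foldl
        (fun (s : Int × Int) i => if p i then (s.1, s.2 + 1) else (max s.1 s.2, 1))
        (mx, a - lastcut)
     max s.1 s.2)
    = (pvGdiffs lastcut ((PySem.List.pyRange a n 1).filter (fun i => !p i)) n).foldl max mx := by
  intro k
  induction k with
  | zero =>
    intro a lastcut mx hle hk
    have ha : a = n := by omega
    subst ha
    rw [PySem.List.pyRange_one_eq_nil (le_refl a)]
    simp [pvGdiffs]
  | succ k ih =>
    intro a lastcut mx hle hk
    have hlt : a < n := by omega
    rw [PySem.List.pyRange_one_cons hlt]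
    by_cases hp : p a
    · simp only [List.foldl_cons, List.filter_cons, hp, Bool.not_true, Bool.false_eq_true,
        if_false, if_true]
      have h1 : a - lastcut + 1 = (a + 1) - lastcut := by ring
      have := ih (a + 1) lastcut mx (by omega) (by omega)
      simpa [h1] using this
    · have hpb : p a = false := by simpa using hp
      simp only [List.foldl_cons, List.filter_cons, hpb, Bool.not_false, if_true, if_false,
        Bool.false_eq_true]
      simp only [pvGdiffs]
      have h1 : (1 : Int) = (a + 1) - a := by ring
      have := ih (a + 1) a (max mx (a - lastcut)) (by omega) (by omega)
      rw [h1]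
      simpa using this

theorem pvFoldlMaxInit (ds : List Int) (d m m' : Int) (h : m ≤ d) (h' : m' ≤ d) :
    (d :: ds).foldl max m = (d :: ds).foldl max m' := by
  simp [List.foldl_cons, max_eq_right h, max_eq_right h']

-- the consecutive_ branch: A's state machine equals B's boundary-difference maximum
theorem pvConsecEq (l : List Char) :
    (max ((PySem.List.pyRange 1 (l.length : Int) 1).foldl
        (fun (s : Int × Int) i =>
          if PySem.List.pyGet? l i == PySem.List.pyGet? l (i - 1) then (s.1, s.2 + 1)
          else (max s.1 s.2, 1)) ((0 : Int), (1 : Int))).1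
      ((PySem.List.pyRange 1 (l.length : Int) 1).foldl
        (fun (s : Int × Int) i =>
          if PySem.List.pyGet? l i == PySem.List.pyGet? l (i - 1) then (s.1, s.2 + 1)
          else (max s.1 s.2, 1)) ((0 : Int), (1 : Int))).2)
    = (((((0 : Int) :: ((PySem.List.pyRange 1 (l.length : Int) 1).filter (fun i => PySem.List.pyGet? l i != PySem.List.pyGet? l (i - 1)) ++ [(l.length : Int)])).zip ((0 : Int) :: ((PySem.List.pyRange 1 (l.length : Int) 1).filter (fun i => PySem.List.pyGet? l i != PySem.List.pyGet? l (i - 1)) ++ [(l.length : Int)])).tail).map (fun q => q.2 - q.1)).foldl max 1) := by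
  rw [List.tail_cons, pvZipDiff]
  simp only [bne]
  by_cases hl0 : l = []
  · subst hl0
    rw [PySem.List.pyRange_one_eq_nil (by norm_num)]
    simp [pvGdiffs]
  · have h1 : (1 : Int) ≤ (l.length : Int) := by
      have := List.length_pos_iff.mpr hl0
      omega
    have hinv := pvInvariant (fun i => PySem.List.pyGet? l i == PySem.List.pyGet? l (i - 1))
      (l.length : Int) ((l.length : Int) - 1).toNat 1 0 0 h1 rfl
    beta_reduce at hinv
    rw [(by norm_num : (1 : Int) - 0 = 1)] at hinv
    rw [hinv]
    rcases hF : (PySem.List.pyRange 1 (l.length : Int) 1).filter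
        (fun i => !(PySem.List.pyGet? l i == PySem.List.pyGet? l (i - 1))) with _ | ⟨c, F'⟩
    · simp only [pvGdiffs]
      exact pvFoldlMaxInit [] ((l.length : Int) - 0) 0 1 (by omega) (by omega)
    · have hc1 : (1 : Int) ≤ c := by
        have hmem : c ∈ (PySem.List.pyRange 1 (l.length : Int) 1).filter
            (fun i => !(PySem.List.pyGet? l i == PySem.List.pyGet? l (i - 1))) := by rw [hF]; simp
        have := (PySem.List.mem_pyRange_one.mp (List.mem_filter.mp hmem).1).1
        omega
      simp only [pvGdiffs]
      exact pvFoldlMaxInit _ (c - 0) 0 1 (by omega) (by omega)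

theorem calculate_vanity_score_py_spec : Claim_equal_calculate_vanity_score_py := by
  intro address pattern _hdom hpre
  unfold Spec_calculate_vanity_score_py calculate_vanity_score_py calculate_vanity_score_py_alt
  by_cases hc : PySem.Str.startswith pattern "consecutive_" = true
  · rw [if_pos hc, if_pos hc]
    obtain ⟨cnt, hcnt⟩ := Option.isSome_iff_exists.mp (hpre hc)
    rw [hcnt]
    simp only []
    rw [pvConsecEq address.toList]
  · rw [if_neg hc, if_neg hc]

@[simp]
theorem calculate_vanity_score_py_raises : Claim_raises_calculate_vanity_score_py := by
  unfold Claim_raises_calculate_vanity_score_py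
  constructor
  · intro address pattern _hd hr hpre
    have := hpre hr.1
    rw [hr.2] at this
    simp at this
  · exact ⟨by decide, by decide, by decide⟩
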